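-- pv_equiv track=rewrite | github.com/felixle1dowski/DHPlanner | src/multi_step_pipeline/clustering_second_stage.py | make_labels_into_cluster_dict
-- ===== SOURCE A (Python) =====
-- def make_labels_into_cluster_dict(member_list, labels):
--     cluster_dict = {}
--     if len(member_list) != len(labels):
--         raise Exception("member list and labels must have same lenght")
--     for unique_label in set(labels):
--         cluster_dict[unique_label] = []
--     for i in range(len(member_list)):
--         cluster_dict[labels[i]].append(member_list[i])
--     # Logger().debug(f"Cluster dict has been created.\n {cluster_dict}")
--     return cluster_dict
-- ===== SOURCE B (Python) =====
-- def make_labels_into_cluster_dict(member_list, labels):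
--     if len(member_list) != len(labels):
--         raise Exception("member list and labels must have same lenght")
--     return {label: [m for m, l in zip(member_list, labels) if l == label]
--             for label in set(labels)}
-- ===== Notes on version B (the rewrite author's own statement) =====
-- stated objective: simpler
-- what changed: Replaces A's two-phase dict mutation (seed empty lists per unique label, then an indexed append pass) with a single dict comprehension that, for each unique label, filters the zipped (member,label) pairs; no mutation and no indexing.
import Mathlib
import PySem

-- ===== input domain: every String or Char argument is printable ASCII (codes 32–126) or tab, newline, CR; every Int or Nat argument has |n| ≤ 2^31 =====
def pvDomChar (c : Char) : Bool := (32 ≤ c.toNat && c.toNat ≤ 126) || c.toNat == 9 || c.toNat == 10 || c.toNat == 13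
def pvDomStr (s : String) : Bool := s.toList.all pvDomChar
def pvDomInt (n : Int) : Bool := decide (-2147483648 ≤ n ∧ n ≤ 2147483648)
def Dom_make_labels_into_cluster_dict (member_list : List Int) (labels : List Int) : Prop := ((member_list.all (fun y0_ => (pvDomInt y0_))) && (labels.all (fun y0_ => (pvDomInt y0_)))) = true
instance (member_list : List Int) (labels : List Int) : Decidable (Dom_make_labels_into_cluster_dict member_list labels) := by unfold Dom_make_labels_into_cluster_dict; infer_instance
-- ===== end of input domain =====

-- B replaces A's two-phase dict mutation (seed empty lists per unique label, then an indexed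
-- append pass) with a per-label filtering comprehension over the zipped pairs: simpler, no mutation.

-- ===== PORT A =====
-- Python dict -> PySem.Dict; the seeding loop over set(labels), then the indexed append loop.
def make_labels_into_cluster_dict (member_list : List Int) (labels : List Int) : List (Int × List Int) :=
  if member_list.length ≠ labels.length then []  -- Python raises here; excluded by Pre_
  else
    let d0 : PySem.Dict Int (List Int) :=
      (PySem.Set.ofList labels).foldl (fun d k => d.insert k []) PySem.Dict.empty
    let d := (PySem.List.pyRange 0 member_list.length 1).foldl
      (fun d i => d.modify (PySem.List.pyGetD labels i 0) []
                    (fun v => v ++ [PySem.List.pyGetD member_list i 0])) d0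
    d.items

-- ===== PORT B =====
def make_labels_into_cluster_dict_alt (member_list : List Int) (labels : List Int) : List (Int × List Int) :=
  if member_list.length ≠ labels.length then []  -- Python raises here; excluded by Pre_
  else
    (PySem.Set.ofList labels).map (fun lab =>
      (lab, ((member_list.zip labels).filter (fun p => p.2 == lab)).map (·.1)))

-- ===== PRECONDITION & SPEC =====
-- A raises exactly when the two lists have different lengths.
def Pre_make_labels_into_cluster_dict (member_list : List Int) (labels : List Int) : Prop :=
  member_list.length = labels.length
instance (member_list : List Int) (labels : List Int) : Decidable (Pre_make_labels_into_cluster_dict member_list labels) := by unfold Pre_make_labels_into_cluster_dict; infer_instance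
def pvWitness_make_labels_into_cluster_dict : List Int × List Int := ([10, 20, 30], [1, 2, 1])

def Spec_make_labels_into_cluster_dict (member_list : List Int) (labels : List Int) (out : List (Int × List Int)) : Prop := out = make_labels_into_cluster_dict_alt member_list labels
instance (member_list : List Int) (labels : List Int) (out : List (Int × List Int)) : Decidable (Spec_make_labels_into_cluster_dict member_list labels out) := by unfold Spec_make_labels_into_cluster_dict; infer_instance

-- ===== CLAIM (what is proved, stated in full; the proofs are below) =====
def Claim_equal_make_labels_into_cluster_dict : Prop := ∀ (member_list : List Int) (labels : List Int), Dom_make_labels_into_cluster_dict member_list labels → Pre_make_labels_into_cluster_dict member_list labels → Spec_make_labels_into_cluster_dict member_list labels (make_labels_into_cluster_dict member_list labels)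

-- ===== LEMMAS AND PROOFS =====

-- A's indexed loop over range(len(member_list)) is the fold over the zipped (label, member) pairs.
theorem foldl_range_getD {α : Type} (g : α → Int → Int → α) :
    ∀ (xs ys : List Int), xs.length = ys.length → ∀ (d : α),
      (List.range ys.length).foldl (fun d k => g d (xs.getD k 0) (ys.getD k 0)) d
        = (xs.zip ys).foldl (fun d p => g d p.1 p.2) d := by
  intro xs ys
  induction xs generalizing ys with
  | nil => intro h d; have : ys = [] := List.eq_nil_of_length_eq_zero h.symm; simp [this]
  | cons x xs ih =>
    intro h d
    cases ys with
    | nil => simp at h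
    | cons y ys =>
      simp only [List.length_cons, List.range_succ_eq_map, List.foldl_cons, List.foldl_map,
        List.getD_cons_zero, List.getD_cons_succ, List.zip_cons_cons]
      exact ih ys (by simpa using h) (g d x y)

-- pyGetD at a nonnegative in-range cast index is getD.
theorem pyGetD_cast (xs : List Int) (k : Nat) :
    PySem.List.pyGetD xs ((k : Nat) : Int) 0 = xs.getD k 0 := by
  simp [pysem]

-- Seeding every key with [] leaves every getD-with-default-[] lookup at [].
theorem getD_seed (l : List Int) :
    ∀ (d : PySem.Dict Int (List Int)), (∀ c, d.getD c [] = []) →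
      ∀ c, (l.foldl (fun d k => d.insert k ([] : List Int)) d).getD c [] = [] := by
  intro d hd
  induction l generalizing d with
  | nil => simpa using hd
  | cons a l ih =>
    intro c
    refine ih (d.insert a []) (fun c => ?_) c
    rw [PySem.Dict.getD_insert]
    split <;> simp [hd]

theorem update_of_subset (s : PySem.Set Int) :
    ∀ (l : List Int), (∀ x ∈ l, x ∈ s) → PySem.Set.update s l = s := by
  intro l
  induction l generalizing s with
  | nil => intro _; rfl
  | cons a l ih =>
    intro h
    have ha : PySem.Set.add s a = s := by
      simp [PySem.Set.add, PySem.Set.contains, h a (by simp)]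
    show PySem.Set.update (PySem.Set.add s a) l = s
    rw [ha]
    exact ih s (fun x hx => h x (by simp [hx]))

-- Collecting seconds of pairs whose first is lab = collecting firsts of the swapped zip.
theorem filter_swap (lab : Int) :
    ∀ (xs ys : List Int),
      ((ys.zip xs).filter (fun p => p.1 == lab)).map (fun p => p.2)
        = ((xs.zip ys).filter (fun p => p.2 == lab)).map (fun p => p.1) := by
  intro xs
  induction xs with
  | nil => intro ys; cases ys <;> simp
  | cons x xs ih =>
    intro ys
    cases ys with
    | nil => simp
    | cons y ys =>
      simp only [List.zip_cons_cons, List.filter_cons]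
      by_cases h : y = lab
      · simp [h, ih]
      · simp [h, ih]

-- ===== VERDICT (by name: the statement is the Claim_ definition above) =====
theorem make_labels_into_cluster_dict_spec : Claim_equal_make_labels_into_cluster_dict := by
  intro ml labels _ hpre
  unfold Spec_make_labels_into_cluster_dict make_labels_into_cluster_dict make_labels_into_cluster_dict_alt
  have hlen : ml.length = labels.length := hpre
  rw [if_neg (by simp [hlen]), if_neg (by simp [hlen])]
  dsimp only
  -- the seeded dict
  set d0 : PySem.Dict Int (List Int) :=
    (PySem.Set.ofList labels).foldl (fun d k => d.insert k []) PySem.Dict.empty with hd0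
  -- A's indexed loop is the fold over the zipped pairs
  have hfold :
      (PySem.List.pyRange 0 (ml.length : Int) 1).foldl
          (fun d i => d.modify (PySem.List.pyGetD labels i 0) []
            (fun v => v ++ [PySem.List.pyGetD ml i 0])) d0
        = (labels.zip ml).foldl (fun d p => d.modify p.1 [] (fun v => v ++ [p.2])) d0 := by
    rw [PySem.List.pyRange_one, List.foldl_map]
    simp only [zero_add, pyGetD_cast, Int.sub_zero, Int.toNat_natCast]
    exact foldl_range_getD (fun d k m => d.modify k [] (fun v => v ++ [m])) labels ml hlen.symm d0
  rw [hfold]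
  set D := (labels.zip ml).foldl (fun d p => d.modify p.1 [] (fun v => v ++ [p.2])) d0 with hD
  have hnd0 : d0.keys.Nodup :=
    PySem.Dict.nodup_keys_foldl_insert _ _ _ (by simp [PySem.Dict.keys_empty])
  have hnd : D.keys.Nodup :=
    PySem.Dict.nodup_keys_foldl_modify_key (labels.zip ml) Prod.fst []
      (fun _ p => fun v => v ++ [p.2]) d0 hnd0
  have hk0 : d0.keys = PySem.Set.ofList labels := by
    rw [hd0, PySem.Dict.keys_foldl_insert]
    rw [show PySem.Set.update PySem.Dict.empty.keys (PySem.Set.ofList labels)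
          = PySem.Set.ofList (PySem.Set.ofList labels) from rfl]
    exact PySem.Set.ofList_ofList labels
  have hk : D.keys = PySem.Set.ofList labels := by
    rw [hD, PySem.Dict.keys_foldl_modify_key (labels.zip ml) Prod.fst []
          (fun _ p => fun v => v ++ [p.2]) d0]
    rw [List.map_fst_zip (le_of_eq hlen.symm), hk0]
    exact update_of_subset _ _ (fun x hx => (PySem.Set.mem_ofList _ _).2 hx)
  have hg : ∀ c, D.getD c []
      = ((labels.zip ml).filter (fun p => p.1 == c)).map (fun p => p.2) := by
    intro c
    rw [hD, PySem.Dict.getD_foldl_modify_append]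
    rw [show d0.getD c [] = [] from
      getD_seed (PySem.Set.ofList labels) PySem.Dict.empty
        (fun c => PySem.Dict.getD_empty c []) c]
    rfl
  rw [PySem.Dict.items_eq_map_keys D hnd [], hk]
  refine List.map_congr_left (fun lab _ => ?_)
  rw [hg lab, filter_swap lab ml labels]
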